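-- pv_equiv track=rewrite | github.com/WANG-Siqi547/flowernet-agent | flowernet-outliner/main.py | _is_transient_outliner_error
-- ===== SOURCE A (Python) =====
-- def _is_transient_outliner_error(message: str) -> bool:
--     text = str(message or "").lower()
--     transient_tokens = [
--         "429", "rate", "too many requests", "resource_exhausted", "quota",
--         "timeout", "timed out", "temporarily", "503", "502", "504", "connection",
--         "retry_after",
--     ]
--     return any(token in text for token in transient_tokens)
-- ===== SOURCE B (Python) =====
-- # transient tokens grouped by their first character: at each text position only
-- # the tokens that could possibly start there are tested
-- _TRANSIENT_BY_HEAD = {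
--     "4": ["429"],
--     "r": ["rate", "resource_exhausted", "retry_after"],
--     "t": ["too many requests", "timeout", "timed out", "temporarily"],
--     "q": ["quota"],
--     "5": ["503", "502", "504"],
--     "c": ["connection"],
-- }
--
--
-- def _is_transient_outliner_error(message: str) -> bool:
--     text = str(message or "").lower()
--     for i in range(len(text)):
--         for t in _TRANSIENT_BY_HEAD.get(text[i], []):
--             if text.startswith(t, i):
--                 return True
--     return False
-- ===== Notes on version B (the rewrite author's own statement) =====
-- stated objective: alternative
-- what changed: B replaces A's 13 independent whole-text substring scans by a single pass over the text positions with a dispatch table keyed by first character, so at each position only the tokens that could start there are tested as prefixes.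
import Mathlib
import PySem

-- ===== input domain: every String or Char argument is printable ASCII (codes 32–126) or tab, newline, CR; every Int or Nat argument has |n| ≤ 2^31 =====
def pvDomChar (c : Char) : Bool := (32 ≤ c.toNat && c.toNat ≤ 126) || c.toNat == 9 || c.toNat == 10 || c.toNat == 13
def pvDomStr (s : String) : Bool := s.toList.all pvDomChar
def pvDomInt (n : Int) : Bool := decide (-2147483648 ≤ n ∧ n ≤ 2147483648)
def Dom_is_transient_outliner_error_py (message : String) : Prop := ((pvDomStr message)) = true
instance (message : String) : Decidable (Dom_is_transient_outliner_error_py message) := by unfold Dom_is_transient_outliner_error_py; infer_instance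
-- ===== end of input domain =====

-- B sweeps the text positions once with a first-character dispatch table, testing
-- only the tokens that could start at each position (alternative decomposition).

-- ===== PORT A =====
def is_transient_outliner_error_py (message : String) : Bool :=
  let text := PySem.Chars.lower (if message == "" then "" else message).toList
  let transient_tokens : List (List Char) :=
    ["429".toList, "rate".toList, "too many requests".toList, "resource_exhausted".toList,
     "quota".toList, "timeout".toList, "timed out".toList, "temporarily".toList,
     "503".toList, "502".toList, "504".toList, "connection".toList, "retry_after".toList]
  transient_tokens.any (fun token => PySem.Chars.isIn token text)

-- ===== PORT B =====
-- the module-level dispatch dict of Source B, a literal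
def pvTransientByHead : PySem.Dict Char (List (List Char)) :=
  PySem.Dict.mk
    [('4', ["429".toList]),
     ('r', ["rate".toList, "resource_exhausted".toList, "retry_after".toList]),
     ('t', ["too many requests".toList, "timeout".toList, "timed out".toList, "temporarily".toList]),
     ('q', ["quota".toList]),
     ('5', ["503".toList, "502".toList, "504".toList]),
     ('c', ["connection".toList])]

def is_transient_outliner_error_py_alt (message : String) : Bool :=
  let text := PySem.Chars.lower (if message == "" then "" else message).toList
  -- text[i] for i ∈ range(len(text)) is always in range, so it is text.getD i ' '
  -- (the default is never taken); text.startswith(t, i) is: t is a prefix of text.drop i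
  (List.range text.length).any (fun i =>
    (pvTransientByHead.getD (text.getD i ' ') []).any
      (fun t => PySem.Chars.startswith (text.drop i) t))

-- ===== PRECONDITION & SPEC =====
def Spec_is_transient_outliner_error_py (message : String) (out : Bool) : Prop := out = is_transient_outliner_error_py_alt message
instance (message : String) (out : Bool) : Decidable (Spec_is_transient_outliner_error_py message out) := by unfold Spec_is_transient_outliner_error_py; infer_instance

-- ===== CLAIM (what is proved, stated in full; the proofs are below) =====
def Claim_equal_is_transient_outliner_error_py : Prop := ∀ (message : String), Dom_is_transient_outliner_error_py message → Spec_is_transient_outliner_error_py message (is_transient_outliner_error_py message)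

-- ===== LEMMAS AND PROOFS =====

-- A's token list, for the proofs
def pvTokensA : List (List Char) :=
  ["429".toList, "rate".toList, "too many requests".toList, "resource_exhausted".toList,
   "quota".toList, "timeout".toList, "timed out".toList, "temporarily".toList,
   "503".toList, "502".toList, "504".toList, "connection".toList, "retry_after".toList]

-- every bucket entry is one of A's tokens whose head is the bucket's key
theorem pv_mem_bucket (c : Char) (t : List Char) (h : t ∈ pvTransientByHead.getD c []) :
    t ∈ pvTokensA ∧ t ≠ [] ∧ t.headD ' ' = c := by
  unfold pvTransientByHead at h
  simp only [PySem.Dict.getD_eq_get?_getD, PySem.Dict.get?_mk_cons] at h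
  split_ifs at h with h1 h2 h3 h4 h5 h6
  all_goals first
    | (rw [show (PySem.Dict.mk ([] : List (Char × List (List Char)))).get? c = none from rfl] at h
       simp at h)
    | (first
        | obtain rfl := eq_of_beq h1
        | obtain rfl := eq_of_beq h2
        | obtain rfl := eq_of_beq h3
        | obtain rfl := eq_of_beq h4
        | obtain rfl := eq_of_beq h5
        | obtain rfl := eq_of_beq h6
       simp only [Option.getD_some] at h
       fin_cases h <;> exact ⟨by decide, by decide, by decide⟩)

-- every token of A lies in the bucket of its head
theorem pv_token_in_bucket (t : List Char) (h : t ∈ pvTokensA) :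
    t ∈ pvTransientByHead.getD (t.headD ' ') [] := by
  fin_cases h <;> decide

-- the dispatch sweep finds a match iff some token is a prefix of some suffix
theorem pv_sweep_iff (s : List Char) :
    ((List.range s.length).any (fun i =>
        (pvTransientByHead.getD (s.getD i ' ') []).any
          (fun t => PySem.Chars.startswith (s.drop i) t)) = true)
      ↔ ∃ t ∈ pvTokensA, ∃ j, t <+: s.drop j := by
  simp only [List.any_eq_true, List.mem_range]
  constructor
  · rintro ⟨i, _, t, ht, hs⟩
    obtain ⟨htok, -, -⟩ := pv_mem_bucket _ t ht
    exact ⟨t, htok, i, (PySem.Chars.startswith_iff _ _).1 hs⟩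
  · rintro ⟨t, ht, j, hp⟩
    have hne : t ≠ [] := by fin_cases ht <;> decide
    obtain ⟨a, b, rfl⟩ : ∃ a b, t = a :: b := by
      cases t with
      | nil => exact absurd rfl hne
      | cons a b => exact ⟨a, b, rfl⟩
    -- the suffix s.drop j is nonempty (it has the nonempty prefix a :: b), so j < s.length
    obtain ⟨u, hu⟩ := hp
    have hdrop : s.drop j ≠ [] := by rw [← hu]; simp
    have hj : j < s.length := by
      by_contra hge
      exact hdrop (List.drop_eq_nil_of_le (by omega))
    refine ⟨j, hj, a :: b, ?_, (PySem.Chars.startswith_iff _ _).2 ⟨u, hu⟩⟩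
    have hhead : s.getD j ' ' = a := by
      have h1 : (s.drop j).head? = some a := by rw [← hu]; simp
      rw [List.getD_eq_getElem?_getD, ← List.head?_drop, h1, Option.getD_some]
    rw [hhead]
    simpa using pv_token_in_bucket _ ht

-- ===== VERDICT (by name: the statement is the Claim_ definition above) =====
theorem is_transient_outliner_error_py_spec : Claim_equal_is_transient_outliner_error_py := by
  intro message _
  unfold Spec_is_transient_outliner_error_py
  unfold is_transient_outliner_error_py is_transient_outliner_error_py_alt
  set text := PySem.Chars.lower (if message == "" then "" else message).toList with htext
  rw [Bool.eq_iff_iff, pv_sweep_iff]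
  simp only [List.any_eq_true]
  constructor
  · rintro ⟨t, ht, hin⟩
    obtain ⟨j, hp⟩ := (PySem.Chars.exists_prefix_drop_iff_isIn t text).2 hin
    exact ⟨t, by simpa [pvTokensA] using ht, j, hp⟩
  · rintro ⟨t, ht, j, hp⟩
    exact ⟨t, by simpa [pvTokensA] using ht,
      (PySem.Chars.exists_prefix_drop_iff_isIn t text).1 ⟨j, hp⟩⟩
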